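-- pv_equiv track=rewrite | github.com/Gyaha/AOC2016 | day07.py | ip_check
-- ===== SOURCE A (Python) =====
-- def ip_check(r: list) -> bool:
--     c = False
--     for p in r:
--         if p[0] == "[":
--             if abba_check(p):
--                 return False
--         else:
--             if abba_check(p):
--                 c = True
--     return c
--
-- def abba_check(s: str) -> bool:
--     for i in range((s[0] == "["), len(s) - 3):
--         if s[i] == s[i + 3] and s[i + 1] == s[i + 2] and not s[i] == s[i + 1]:
--             return True
--     return False
-- ===== SOURCE B (Python) =====
-- def _abba(s) -> bool:
--     # 4-gram sliding window via zipped shifts: no index arithmetic, no range scan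
--     return any(a == d and b == c and a != b
--                for a, b, c, d in zip(s, s[1:], s[2:], s[3:]))
--
-- def ip_check(r: list) -> bool:
--     # Recursive, accumulator-free: commit as soon as the verdict is decided.
--     if not r:
--         return False
--     p = r[0]
--     if p[0] == "[":
--         return not _abba(p[1:]) and ip_check(r[1:])
--     if _abba(p):
--         return all(not _abba(q[1:]) for q in r[1:] if q[0] == "[")
--     return ip_check(r[1:])
-- ===== Notes on version B (the rewrite author's own statement) =====
-- stated objective: alternative
-- what changed: Replaced A's index-range ABBA scan by a zip-of-shifted-slices 4-gram detector, and A's flag-carrying loop by an accumulator-free recursion that commits early: a hypernet with an ABBA yields False at once, a supernet with an ABBA reduces the answer to 'no later hypernet has an ABBA'.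
-- outside the precondition, e.g. on ip_check(['']): A raises IndexError, B raises IndexError
import Mathlib
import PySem

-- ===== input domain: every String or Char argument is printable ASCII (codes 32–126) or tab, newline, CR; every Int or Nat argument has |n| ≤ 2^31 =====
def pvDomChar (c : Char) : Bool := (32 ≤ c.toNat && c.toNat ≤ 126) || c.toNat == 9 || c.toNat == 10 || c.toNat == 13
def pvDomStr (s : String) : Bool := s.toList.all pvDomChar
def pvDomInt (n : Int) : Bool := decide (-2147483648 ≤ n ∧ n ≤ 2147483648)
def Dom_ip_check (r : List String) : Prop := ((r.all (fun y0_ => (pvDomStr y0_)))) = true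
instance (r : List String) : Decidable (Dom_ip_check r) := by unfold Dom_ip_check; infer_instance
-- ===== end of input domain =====

-- B replaces A's index-scanning abba_check and flag-carrying loop by a zip-of-shifts
-- 4-gram detector and an accumulator-free recursion that commits the verdict early (simpler).

-- ===== PORT A =====
-- A's helper: index scan for an ABBA, starting at 1 if s[0]=='['
def abba_check (s : String) : Bool :=
  let cs := s.toList
  let start : Int := if cs.head? = some '[' then 1 else 0
  (PySem.List.pyRange start ((cs.length : Int) - 3) 1).any (fun i =>
    PySem.List.pyGet? cs i = PySem.List.pyGet? cs (i + 3) &&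
    PySem.List.pyGet? cs (i + 1) = PySem.List.pyGet? cs (i + 2) &&
    !(PySem.List.pyGet? cs i = PySem.List.pyGet? cs (i + 1)))

-- A's loop: flag c, early return False on a hypernet ABBA
def ipLoopA : List String → Bool → Bool
  | [], c => c
  | p :: rest, c =>
    if p.toList.head? = some '[' then
      if abba_check p then false else ipLoopA rest c
    else
      ipLoopA rest (c || abba_check p)

def ip_check (r : List String) : Bool := ipLoopA r false

-- ===== PORT B =====
-- B's helper: any 4-gram (a,b,c,d) of zipped shifts with a=d, b=c, a≠b
def abba4 (s : List Char) : Bool :=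
  ((s.zip (s.drop 1)).zip ((s.drop 2).zip (s.drop 3))).any (fun w =>
    w.1.1 = w.2.2 && w.1.2 = w.2.1 && !(w.1.1 = w.1.2))

def ip_check_alt : List String → Bool
  | [] => false
  | p :: rest =>
    let cs := p.toList
    if cs.head? = some '[' then
      !(abba4 (cs.drop 1)) && ip_check_alt rest
    else if abba4 cs then
      (rest.filter (fun q => q.toList.head? = some '[')).all (fun q => !(abba4 (q.toList.drop 1)))
    else ip_check_alt rest

-- ===== PRECONDITION & SPEC =====
-- Pre_ excludes lists containing an empty string: there Python A raises IndexError on p[0].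
def Pre_ip_check (r : List String) : Prop := ∀ p ∈ r, p ≠ ""
instance (r : List String) : Decidable (Pre_ip_check r) := by unfold Pre_ip_check; infer_instance
def pvWitness_ip_check : List String := ["abba", "[cddc]"]

def Spec_ip_check (r : List String) (out : Bool) : Prop := out = ip_check_alt r
instance (r : List String) (out : Bool) : Decidable (Spec_ip_check r out) := by unfold Spec_ip_check; infer_instance

-- ===== CLAIM (what is proved, stated in full; the proofs are below) =====
def Claim_equal_ip_check : Prop := ∀ (r : List String), Dom_ip_check r → Pre_ip_check r → Spec_ip_check r (ip_check r)

-- ===== LEMMAS AND PROOFS =====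

-- the window test A's range scan applies at index i
def chkA (cs : List Char) (i : Int) : Bool :=
  PySem.List.pyGet? cs i = PySem.List.pyGet? cs (i + 3) &&
  PySem.List.pyGet? cs (i + 1) = PySem.List.pyGet? cs (i + 2) &&
  !(PySem.List.pyGet? cs i = PySem.List.pyGet? cs (i + 1))

theorem chkA_shift (a : Char) (t : List Char) (k : Nat) :
    chkA (a :: t) (1 + (k : Int)) = chkA t (k : Int) := by
  unfold chkA
  rw [show (1:Int)+(k:Int)+3 = ((k+4:Nat):Int) by push_cast; ring,
      show (1:Int)+(k:Int)+2 = ((k+3:Nat):Int) by push_cast; ring,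
      show (1:Int)+(k:Int)+1 = ((k+2:Nat):Int) by push_cast; ring,
      show (1:Int)+(k:Int) = ((k+1:Nat):Int) by push_cast; ring,
      show (k:Int)+3 = ((k+3:Nat):Int) by push_cast; ring,
      show (k:Int)+2 = ((k+2:Nat):Int) by push_cast; ring,
      show (k:Int)+1 = ((k+1:Nat):Int) by push_cast; ring]
  simp only [PySem.List.pyGet?_natCast]
  simp [show k+4 = (k+3)+1 from rfl, show k+3 = (k+2)+1 from rfl,
        show k+2 = (k+1)+1 from rfl, List.getElem?_cons_succ]

theorem range_shift (a : Char) (t : List Char) (m : Int) :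
    (PySem.List.pyRange 1 (m + 1) 1).any (chkA (a :: t)) =
      (PySem.List.pyRange 0 m 1).any (chkA t) := by
  rw [PySem.List.pyRange_one, PySem.List.pyRange_one]
  have : (m + 1 - 1).toNat = (m - 0).toNat := by omega
  rw [this, List.any_map, List.any_map]
  congr 1
  funext k
  simpa using chkA_shift a t k

theorem abba4_short (cs : List Char) (h : cs.length ≤ 3) : abba4 cs = false := by
  match cs, h with
  | [], _ => rfl
  | [a], _ => rfl
  | [a, b], _ => rfl
  | [a, b, c], _ => rfl

theorem range_eq_abba4 (cs : List Char) :
    (PySem.List.pyRange 0 ((cs.length : Int) - 3) 1).any (chkA cs) = abba4 cs := by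
  induction cs with
  | nil => simp [PySem.List.pyRange_one_eq_nil, abba4]
  | cons a t ih =>
    by_cases h : (t.length : Int) - 3 + 1 ≤ 0
    · rw [show ((((a :: t).length : Int)) - 3) = (t.length : Int) - 3 + 1 by simp; ring]
      rw [PySem.List.pyRange_one_eq_nil h, abba4_short _ (by simp at h ⊢; omega)]
      rfl
    · -- 3 ≤ t.length, so t = b :: c :: d :: t'
      have hlen : 3 ≤ t.length := by omega
      match t, hlen with
      | b :: c :: d :: t', _ =>
        have hcons : PySem.List.pyRange 0 (((a :: b :: c :: d :: t').length : Int) - 3) 1 =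
            0 :: PySem.List.pyRange 1 (((a :: b :: c :: d :: t').length : Int) - 3) 1 := by
          apply PySem.List.pyRange_one_cons
          simp; omega
        rw [hcons, List.any_cons]
        have hsplit : (((a :: b :: c :: d :: t').length : Int) - 3) =
            (((b :: c :: d :: t').length : Int) - 3) + 1 := by simp; ring
        rw [hsplit, range_shift a _ _, ih]
        have hhead : chkA (a :: b :: c :: d :: t') 0 =
            (a = d && b = c && !(a = b)) := by
          unfold chkA
          rw [show (0:Int)+3 = ((3:Nat):Int) by norm_num,
              show (0:Int)+2 = ((2:Nat):Int) by norm_num,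
              show (0:Int)+1 = ((1:Nat):Int) by norm_num,
              show (0:Int) = ((0:Nat):Int) by norm_num]
          simp only [PySem.List.pyGet?_natCast]
          simp
        rw [hhead]
        show _ = abba4 (a :: b :: c :: d :: t')
        simp [abba4, List.zip]

theorem abba_check_eq (s : String) :
    abba_check s =
      (if s.toList.head? = some '[' then abba4 (s.toList.drop 1) else abba4 s.toList) := by
  unfold abba_check
  by_cases h : s.toList.head? = some '['
  · simp only [h, if_true]
    obtain ⟨t, ht⟩ : ∃ t, s.toList = '[' :: t := by
      cases hs : s.toList with
      | nil => rw [hs] at h; simp at h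
      | cons x xs => rw [hs] at h; simp at h; exact ⟨xs, by rw [h]⟩
    rw [ht]
    have : ((('[' :: t).length : Int) - 3) = ((t.length : Int) - 3) + 1 := by simp; ring
    rw [this]
    show (PySem.List.pyRange 1 _ 1).any (chkA ('[' :: t)) = abba4 t
    rw [range_shift '[' t _, range_eq_abba4]
  · simp only [h, if_false]
    exact range_eq_abba4 s.toList

-- closed forms for both sides
def anyHyp (r : List String) : Bool :=
  (r.filter (fun p => p.toList.head? = some '[')).any (fun p => abba4 (p.toList.drop 1))
def anySup (r : List String) : Bool :=
  (r.filter (fun p => ¬ (p.toList.head? = some '['))).any (fun p => abba4 p.toList)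

theorem ipLoopA_eq (r : List String) (c : Bool) :
    ipLoopA r c = (!(anyHyp r) && (c || anySup r)) := by
  induction r generalizing c with
  | nil => simp [ipLoopA, anyHyp, anySup]
  | cons p rest ih =>
    by_cases h : p.toList.head? = some '['
    · have ha := abba_check_eq p
      rw [if_pos h] at ha
      simp [ipLoopA, h, ha, ih, anyHyp, anySup, List.filter, Bool.and_assoc]
    · have ha := abba_check_eq p
      rw [if_neg h] at ha
      simp [ipLoopA, h, ha, ih, anyHyp, anySup, List.filter, Bool.or_assoc]

theorem all_not_eq_not_any (r : List String) :
    (r.all fun a => !decide (a.toList.head? = some '[') || !abba4 a.toList.tail) =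
      !r.any fun a => decide (a.toList.head? = some '[') && abba4 a.toList.tail := by
  simp [← Bool.not_and, List.all_eq_not_any_not]

theorem ip_check_alt_eq (r : List String) :
    ip_check_alt r = (!(anyHyp r) && anySup r) := by
  induction r with
  | nil => simp [ip_check_alt, anyHyp, anySup]
  | cons p rest ih =>
    by_cases h : p.toList.head? = some '['
    · simp [ip_check_alt, h, ih, anyHyp, anySup, List.filter, Bool.not_or, Bool.and_assoc]
    · by_cases hb : abba4 p.toList = true
      · simp [ip_check_alt, h, hb, anyHyp, anySup, List.filter, all_not_eq_not_any]

      · simp [ip_check_alt, h, hb, ih, anyHyp, anySup, List.filter]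

-- ===== VERDICT (by name: the statement is the Claim_ definition above) =====
theorem ip_check_spec : Claim_equal_ip_check := by
  intro r _ _
  unfold Spec_ip_check ip_check
  rw [ipLoopA_eq, ip_check_alt_eq]
  simp
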